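-- pv_equiv track=rewrite | github.com/hshrimp/letecode_for_me | letecode/217-240/233.py | countDigitOne2
-- ===== SOURCE A (Python) =====
-- def countDigitOne2(n: int) -> int:
--     if n < 1:
--         return 0
--     res = 0
--     base = 1
--     while n // base:
--         cur = n // base % 10
--         high = n // base // 10
--         low = n % base
--         if cur > 1:
--             res += (high + 1) * base
--         if cur == 1:
--             res += low + 1 + high * base
--         if cur < 1:
--             res += high * base
--         base *= 10
--     return res
-- ===== SOURCE B (Python) =====
-- def countDigitOne2(n: int) -> int:
--     # Recursion on the magnitude: split off the most significant digit.
--     if n < 1: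
--         return 0
--     p = 1
--     while p * 10 <= n:
--         p *= 10
--     high, rem = divmod(n, p)
--     if high == 1:
--         return countDigitOne2(p - 1) + rem + 1 + countDigitOne2(rem)
--     return high * countDigitOne2(p - 1) + p + countDigitOne2(rem)
-- ===== Notes on version B (the rewrite author's own statement) =====
-- stated objective: alternative
-- what changed: Replaces A's least-significant-first positional while-loop accumulation with a recursion on the magnitude of n that splits off the most significant digit (count(n) = high*count(p-1) + top-digit term + count(n mod p) with p the largest power of ten below n).
import Mathlib
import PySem

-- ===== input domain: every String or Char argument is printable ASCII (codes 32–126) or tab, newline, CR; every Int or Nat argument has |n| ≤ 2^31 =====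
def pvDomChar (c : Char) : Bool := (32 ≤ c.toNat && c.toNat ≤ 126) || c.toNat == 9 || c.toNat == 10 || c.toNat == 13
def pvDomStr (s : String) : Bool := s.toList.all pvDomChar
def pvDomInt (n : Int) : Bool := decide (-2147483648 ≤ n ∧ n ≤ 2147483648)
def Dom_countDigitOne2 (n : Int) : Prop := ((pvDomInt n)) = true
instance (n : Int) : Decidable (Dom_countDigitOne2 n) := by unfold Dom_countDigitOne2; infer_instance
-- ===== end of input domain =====

-- B replaces A's least-significant-first positional while-loop with a recursion on the
-- magnitude of n that splits off the most significant digit (objective: alternative algorithm).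

-- ===== PORT A =====
-- A's while loop, fueled: the loop exits when n // base == 0; base is multiplied by 10
-- each round, so for n ≥ 1 at most (number of digits of n) ≤ n.toNat + 1 rounds happen,
-- hence fuel n.toNat + 1 makes the fueled loop exit exactly where Python's loop exits.
def countDigitOne2Loop : Nat → Int → Int → Int → Int
  | 0, _, _, res => res
  | fuel+1, n, base, res =>
    if PySem.Int.floordiv n base ≠ 0 then
      let cur := PySem.Int.mod (PySem.Int.floordiv n base) 10
      let high := PySem.Int.floordiv (PySem.Int.floordiv n base) 10
      let low := PySem.Int.mod n base
      let res1 := if cur > 1 then res + (high + 1) * base else res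
      let res2 := if cur = 1 then res1 + (low + 1 + high * base) else res1
      let res3 := if cur < 1 then res2 + high * base else res2
      countDigitOne2Loop fuel n (base * 10) res3
    else res

def countDigitOne2 (n : Int) : Int :=
  if n < 1 then 0 else countDigitOne2Loop (n.toNat + 1) n 1 0

-- ===== PORT B =====
-- B's 'p = 1; while p * 10 <= n: p *= 10' loop, fueled (at most log10 n ≤ n.toNat rounds).
def pow10Below : Nat → Int → Int → Int
  | 0, _, p => p
  | fuel+1, n, p => if p * 10 ≤ n then pow10Below fuel n (p * 10) else p

-- bounds used only for the termination argument of the port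
theorem pow10Below_bounds (fuel : Nat) (n p : Int) (h1 : 1 ≤ p) (h2 : p ≤ n) :
    1 ≤ pow10Below fuel n p ∧ pow10Below fuel n p ≤ n := by
  induction fuel generalizing p with
  | zero => exact ⟨h1, h2⟩
  | succ fuel ih =>
    simp only [pow10Below]
    split
    · exact ih (p * 10) (by omega) (by assumption)
    · exact ⟨h1, h2⟩

def countDigitOne2_alt (n : Int) : Int :=
  if h : n < 1 then 0
  else
    let p := pow10Below n.toNat n 1
    let high := PySem.Int.floordiv n p
    let rem := PySem.Int.mod n p
    if high = 1 then countDigitOne2_alt (p - 1) + rem + 1 + countDigitOne2_alt rem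
    else high * countDigitOne2_alt (p - 1) + p + countDigitOne2_alt rem
termination_by n.toNat
decreasing_by
  all_goals
    have hb := pow10Below_bounds n.toNat n 1 (by omega) (by omega)
    first
    | omega
    | · have hm : PySem.Int.mod n (pow10Below n.toNat n 1) =
            n % (pow10Below n.toNat n 1) :=
          PySem.Int.mod_eq_emod_of_pos (by omega)
        have h1 := Int.emod_nonneg n (show pow10Below n.toNat n 1 ≠ 0 by omega)
        have h2 := Int.emod_lt_of_pos n (show 0 < pow10Below n.toNat n 1 by omega)
        omega

-- ===== PRECONDITION & SPEC =====
def Spec_countDigitOne2 (n : Int) (out : Int) : Prop := out = countDigitOne2_alt n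
instance (n : Int) (out : Int) : Decidable (Spec_countDigitOne2 n out) := by unfold Spec_countDigitOne2; infer_instance

-- ===== CLAIM (what is proved, stated in full; the proofs are below) =====
def Claim_equal_countDigitOne2 : Prop := ∀ (n : Int), Dom_countDigitOne2 n → Spec_countDigitOne2 n (countDigitOne2 n)

-- ===== LEMMAS AND PROOFS =====

-- Nat-level model of A's per-base contribution and its prefix sums
def fA (N b : Nat) : Nat :=
  if N / b % 10 > 1 then (N / b / 10 + 1) * b
  else if N / b % 10 = 1 then N % b + 1 + N / b / 10 * b
  else N / b / 10 * b

def SA (N L : Nat) : Nat := ∑ k ∈ Finset.range L, fA N (10 ^ k)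

theorem fA_zero (N b : Nat) (h : N < b) : fA N b = 0 := by
  have hd : N / b = 0 := Nat.div_eq_of_lt h
  simp [fA, hd]

theorem SA_pad (N M L L' : Nat) (hM : ∀ k, M ≤ k → N < 10 ^ k)
    (h1 : M ≤ L) (h2 : M ≤ L') : SA N L = SA N L' := by
  have key : ∀ J, M ≤ J → SA N J = SA N M := by
    intro J hJ
    induction J with
    | zero =>
      have : M = 0 := by omega
      rw [this]
    | succ J ih =>
      rcases Nat.lt_or_ge M (J+1) with hlt | hge
      · have hMJ : M ≤ J := by omega
        rw [SA, Finset.sum_range_succ, ← SA, ih hMJ, fA_zero N _ (hM J hMJ)]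
        simp
      · have : M = J + 1 := by omega
        rw [this]
  rw [key L h1, key L' h2]
theorem loop_eq (fuel : Nat) : ∀ (k : Nat) (N : Nat) (res : Int), N < 10 ^ (k + fuel) →
    countDigitOne2Loop fuel (N : Int) ((10 ^ k : Nat) : Int) res
      = res + ∑ j ∈ Finset.range fuel, ((fA N (10 ^ (k + j)) : Nat) : Int) := by
  induction fuel with
  | zero => intro k N res _; simp [countDigitOne2Loop]
  | succ fuel ih =>
    intro k N res hlt
    have hfd : PySem.Int.floordiv (N : Int) ((10 ^ k : Nat) : Int) = ((N / 10 ^ k : Nat) : Int) :=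
      PySem.Int.floordiv_natCast N (10 ^ k)
    by_cases hz : N / 10 ^ k = 0
    · have hNk : N < 10 ^ k := by
        rcases Nat.div_eq_zero_iff.1 hz with h | h
        · exact absurd h (by positivity)
        · exact h
      rw [countDigitOne2Loop, if_neg (by rw [hfd, hz]; simp)]
      have hterms : ∀ j ∈ Finset.range (fuel + 1), ((fA N (10 ^ (k + j)) : Nat) : Int) = 0 := by
        intro j _
        have : N < 10 ^ (k + j) := lt_of_lt_of_le hNk (Nat.pow_le_pow_right (by norm_num) (by omega))
        simp [fA_zero N _ this]
      rw [Finset.sum_eq_zero hterms]; ring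
    · have hmd : PySem.Int.mod ((N / 10 ^ k : Nat) : Int) (10 : Int) = ((N / 10 ^ k % 10 : Nat) : Int) := by
        exact_mod_cast PySem.Int.mod_natCast (N / 10 ^ k) 10
      have hfd2 : PySem.Int.floordiv ((N / 10 ^ k : Nat) : Int) (10 : Int) = ((N / 10 ^ k / 10 : Nat) : Int) := by
        exact_mod_cast PySem.Int.floordiv_natCast (N / 10 ^ k) 10
      have hlow : PySem.Int.mod (N : Int) ((10 ^ k : Nat) : Int) = ((N % 10 ^ k : Nat) : Int) :=
        PySem.Int.mod_natCast N (10 ^ k)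
      rw [countDigitOne2Loop, if_pos (by rw [hfd]; exact_mod_cast hz)]
      simp only [hfd, hmd, hfd2, hlow]
      have hbase : ((10 ^ k : Nat) : Int) * 10 = ((10 ^ (k + 1) : Nat) : Int) := by
        push_cast [pow_succ]; ring
      rw [hbase]
      have hres3 : ∀ r : Int,
          (if ((N / 10 ^ k % 10 : Nat) : Int) < 1 then
            (if ((N / 10 ^ k % 10 : Nat) : Int) = 1 then
              (if ((N / 10 ^ k % 10 : Nat) : Int) > 1 then r + (((N / 10 ^ k / 10 : Nat) : Int) + 1) * ((10 ^ k : Nat) : Int) else r)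
                + (((N % 10 ^ k : Nat) : Int) + 1 + ((N / 10 ^ k / 10 : Nat) : Int) * ((10 ^ k : Nat) : Int))
             else (if ((N / 10 ^ k % 10 : Nat) : Int) > 1 then r + (((N / 10 ^ k / 10 : Nat) : Int) + 1) * ((10 ^ k : Nat) : Int) else r))
              + ((N / 10 ^ k / 10 : Nat) : Int) * ((10 ^ k : Nat) : Int)
           else
            (if ((N / 10 ^ k % 10 : Nat) : Int) = 1 then
              (if ((N / 10 ^ k % 10 : Nat) : Int) > 1 then r + (((N / 10 ^ k / 10 : Nat) : Int) + 1) * ((10 ^ k : Nat) : Int) else r)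
                + (((N % 10 ^ k : Nat) : Int) + 1 + ((N / 10 ^ k / 10 : Nat) : Int) * ((10 ^ k : Nat) : Int))
             else (if ((N / 10 ^ k % 10 : Nat) : Int) > 1 then r + (((N / 10 ^ k / 10 : Nat) : Int) + 1) * ((10 ^ k : Nat) : Int) else r)))
          = r + ((fA N (10 ^ k) : Nat) : Int) := by
        intro r
        simp only [fA]
        split_ifs <;> first | (exfalso; omega) | (push_cast; ring)
      rw [hres3]
      rw [ih (k + 1) N _ (by rw [show k + 1 + fuel = k + (fuel + 1) from by omega]; exact hlt)]
      rw [Finset.sum_range_succ' (fun j => ((fA N (10 ^ (k + j)) : Nat) : Int)) fuel]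
      have hcg : ∀ j ∈ Finset.range fuel,
          ((fA N (10 ^ (k + 1 + j)) : Nat) : Int) = ((fA N (10 ^ (k + (j + 1))) : Nat) : Int) := by
        intro j _; rw [show k + 1 + j = k + (j + 1) from by omega]
      rw [Finset.sum_congr rfl hcg]
      simp; ring
theorem A_eq_SA (N : Nat) : countDigitOne2 (N : Int) = ((SA N (N + 1) : Nat) : Int) := by
  rcases Nat.eq_zero_or_pos N with h0 | h1
  · subst h0; simp [countDigitOne2, SA, fA]
  · rw [countDigitOne2, if_neg (by exact_mod_cast by omega)]
    have ht : ((N : Int)).toNat = N := by omega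
    have h1' : (1 : Int) = ((10 ^ 0 : Nat) : Int) := by norm_num
    rw [ht, h1', loop_eq (N + 1) 0 N 0 (by
      have := Nat.lt_pow_self (a := 10) (n := N) (by norm_num)
      calc N < 10 ^ N := this
        _ ≤ 10 ^ (0 + (N + 1)) := Nat.pow_le_pow_right (by norm_num) (by omega))]
    rw [SA]
    push_cast
    simp

-- divide H * 10^(k+e) + R by 10^k
theorem div_pow_split (H R k e : Nat) : (H * 10 ^ (k + e) + R) / 10 ^ k = H * 10 ^ e + R / 10 ^ k := by
  have h : H * 10 ^ (k + e) + R = R + (H * 10 ^ e) * 10 ^ k := by rw [pow_add]; ring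
  rw [h, Nat.add_mul_div_right _ _ (by positivity)]
  ring

theorem mod_pow_split (H R k e : Nat) : (H * 10 ^ (k + e) + R) % 10 ^ k = R % 10 ^ k := by
  have h : H * 10 ^ (k + e) + R = R + (H * 10 ^ e) * 10 ^ k := by rw [pow_add]; ring
  rw [h, Nat.add_mul_mod_self_right]

-- each low-position term of the sum for N = H*10^L + R splits off H * 10^(L-1)
theorem fA_split (H R k L : Nat) (hk : k < L) :
    fA (H * 10 ^ L + R) (10 ^ k) = fA R (10 ^ k) + H * 10 ^ (L - 1) := by
  obtain ⟨e, he⟩ : ∃ e, L = k + (e + 1) := ⟨L - k - 1, by omega⟩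
  subst he
  have hq : (H * 10 ^ (k + (e + 1)) + R) / 10 ^ k = H * 10 ^ (e + 1) + R / 10 ^ k :=
    div_pow_split H R k (e + 1)
  have hcur : (H * 10 ^ (e + 1) + R / 10 ^ k) % 10 = R / 10 ^ k % 10 := by
    have : H * 10 ^ (e + 1) + R / 10 ^ k = R / 10 ^ k + (H * 10 ^ e) * 10 := by rw [pow_succ]; ring
    rw [this, Nat.add_mul_mod_self_right]
  have hhigh : (H * 10 ^ (e + 1) + R / 10 ^ k) / 10 = R / 10 ^ k / 10 + H * 10 ^ e := by
    have : H * 10 ^ (e + 1) + R / 10 ^ k = R / 10 ^ k + (H * 10 ^ e) * 10 := by rw [pow_succ]; ring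
    rw [this, Nat.add_mul_div_right _ _ (by norm_num)]
  have hlow : (H * 10 ^ (k + (e + 1)) + R) % 10 ^ k = R % 10 ^ k := mod_pow_split H R k (e + 1)
  have hpow : 10 ^ e * 10 ^ k = 10 ^ (k + (e + 1) - 1) := by
    rw [← pow_add]; congr 1; omega
  rw [fA, fA, hq, hcur, hhigh, hlow]
  split_ifs with h1 h2 <;>
    rw [show k + (e + 1) - 1 = e + k from by omega, pow_add] <;> ring

-- the top term: N = H*10^L + R with 1 ≤ H < 10, R < 10^L
theorem fA_top (H R L : Nat) (hH1 : 1 ≤ H) (hH9 : H < 10) (hR : R < 10 ^ L) :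
    fA (H * 10 ^ L + R) (10 ^ L) = if H = 1 then R + 1 else 10 ^ L := by
  have hq : (H * 10 ^ L + R) / 10 ^ L = H := by
    have : H * 10 ^ L + R = R + H * 10 ^ L := by ring
    rw [this, Nat.add_mul_div_right _ _ (by positivity), Nat.div_eq_of_lt hR]; omega
  have hlow : (H * 10 ^ L + R) % 10 ^ L = R := by
    have : H * 10 ^ L + R = R + H * 10 ^ L := by ring
    rw [this, Nat.add_mul_mod_self_right, Nat.mod_eq_of_lt hR]
  rw [fA, hq, hlow]
  have hm : H % 10 = H := Nat.mod_eq_of_lt hH9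
  have hd : H / 10 = 0 := Nat.div_eq_of_lt hH9
  rw [hm, hd]
  split_ifs <;> first | (exfalso; omega) | ring | rfl
theorem fA_nines (L k : Nat) (hk : k < L) : fA (10 ^ L - 1) (10 ^ k) = 10 ^ (L - 1) := by
  obtain ⟨e, he⟩ : ∃ e, L = k + (e + 1) := ⟨L - k - 1, by omega⟩
  subst he
  have ha : 1 ≤ 10 ^ k := Nat.one_le_pow _ _ (by norm_num)
  have hc : 1 ≤ 10 ^ e := Nat.one_le_pow _ _ (by norm_num)
  have hb : 10 ^ (e + 1) = 10 * 10 ^ e := by rw [pow_succ]; ring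
  have hrepr : 10 ^ (k + (e + 1)) - 1 = (10 ^ k - 1) + (10 ^ (e + 1) - 1) * 10 ^ k := by
    have hmul : 10 ^ (k + (e + 1)) = 10 ^ (e + 1) * 10 ^ k := by rw [← pow_add]; ring_nf
    have hle : 10 ^ k ≤ 10 ^ (e + 1) * 10 ^ k := Nat.le_mul_of_pos_left _ (by positivity)
    rw [Nat.sub_one_mul]
    omega
  have hdiv : (10 ^ (k + (e + 1)) - 1) / 10 ^ k = 10 ^ (e + 1) - 1 := by
    rw [hrepr, Nat.add_mul_div_right _ _ (by positivity), Nat.div_eq_of_lt (by omega)]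
    omega
  rw [fA, hdiv]
  have hcur : (10 ^ (e + 1) - 1) % 10 = 9 := by rw [hb]; omega
  have hhigh : (10 ^ (e + 1) - 1) / 10 = 10 ^ e - 1 := by rw [hb]; omega
  rw [hcur, hhigh, if_pos (by norm_num)]
  rw [show 10 ^ e - 1 + 1 = 10 ^ e from by omega, ← pow_add]
  congr 1
  omega

theorem SA_nines (L : Nat) : SA (10 ^ L - 1) L = L * 10 ^ (L - 1) := by
  rw [SA, Finset.sum_congr rfl (fun k hk => fA_nines L k (Finset.mem_range.1 hk)),
      Finset.sum_const, Finset.card_range, smul_eq_mul]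

theorem SA_zero (L : Nat) : SA 0 L = 0 := by simp [SA, fA]

theorem SA_norm (R L : Nat) (h : R < 10 ^ L) : SA R L = SA R (R + 1) := by
  rcases Nat.eq_zero_or_pos R with h0 | h1
  · subst h0; rw [SA_zero, SA_zero]
  · exact SA_pad R (Nat.log 10 R + 1) L (R + 1)
      (fun k hk => lt_of_lt_of_le (Nat.lt_pow_succ_log_self (by norm_num) R)
        (Nat.pow_le_pow_right (by norm_num) hk))
      (Nat.log_lt_of_lt_pow (by omega) h)
      (by have := Nat.log_le_self 10 R; omega)

theorem SA_main (N L : Nat) (_h1 : 1 ≤ N) (hLo : 10 ^ L ≤ N) (hHi : N < 10 ^ (L + 1)) :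
    SA N (N + 1) =
      if N / 10 ^ L = 1 then
        SA (10 ^ L - 1) (10 ^ L - 1 + 1) + N % 10 ^ L + 1 + SA (N % 10 ^ L) (N % 10 ^ L + 1)
      else N / 10 ^ L * SA (10 ^ L - 1) (10 ^ L - 1 + 1) + 10 ^ L + SA (N % 10 ^ L) (N % 10 ^ L + 1) := by
  set P := 10 ^ L with hP
  set H := N / P with hH
  set R := N % P with hR
  have hP1 : 1 ≤ P := Nat.one_le_pow _ _ (by norm_num)
  have hRP : R < P := Nat.mod_lt _ (by omega)
  have hNrepr : N = H * P + R := by rw [Nat.mul_comm]; exact (Nat.div_add_mod N P).symm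
  have hH1 : 1 ≤ H := (Nat.one_le_div_iff (by omega)).2 hLo
  have hH9 : H < 10 := (Nat.div_lt_iff_lt_mul (by omega)).2
    (by rw [hP, mul_comm, ← pow_succ]; exact hHi)
  have hLP : L < P := by rw [hP]; exact Nat.lt_pow_self (by norm_num)
  have e1 : SA N (N + 1) = SA N (L + 1) :=
    SA_pad N (L + 1) (N + 1) (L + 1)
      (fun k hk => lt_of_lt_of_le hHi (Nat.pow_le_pow_right (by norm_num) hk))
      (by omega) (le_refl _)
  have e2 : SA N (L + 1) = SA N L + fA N P := by rw [SA, Finset.sum_range_succ, ← SA, hP]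
  have e3 : SA N L = SA R L + L * (H * 10 ^ (L - 1)) := by
    rw [SA]
    have hterm : ∀ k ∈ Finset.range L, fA N (10 ^ k) = fA R (10 ^ k) + H * 10 ^ (L - 1) := by
      intro k hk
      conv_lhs => rw [hNrepr, hP]
      exact fA_split H R k L (Finset.mem_range.1 hk)
    rw [Finset.sum_congr rfl hterm, Finset.sum_add_distrib, Finset.sum_const, Finset.card_range,
        smul_eq_mul, ← SA]
  have e4 : fA N P = if H = 1 then R + 1 else P := by
    conv_lhs => rw [hNrepr, hP]
    rw [hP]
    exact fA_top H R L hH1 hH9 (by rw [← hP]; exact hRP)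
  have e5 : SA R L = SA R (R + 1) := SA_norm R L (by rw [← hP]; exact hRP)
  have e6 : SA (P - 1) (P - 1 + 1) = L * 10 ^ (L - 1) := by
    have epad : SA (P - 1) (P - 1 + 1) = SA (P - 1) L :=
      SA_pad (P - 1) L (P - 1 + 1) L
        (fun k hk => by
          have : P ≤ 10 ^ k := by rw [hP]; exact Nat.pow_le_pow_right (by norm_num) hk
          omega)
        (by omega) (le_refl _)
    rw [epad, hP, SA_nines]
  rw [e1, e2, e3, e4, e5, e6]
  split_ifs with h
  · rw [h]; ring
  · ring

theorem pow10Below_eq (N : Nat) (fuel : Nat) : ∀ j : Nat, 10 ^ j ≤ N → N < 10 ^ (j + fuel) →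
    pow10Below fuel (N : Int) ((10 ^ j : Nat) : Int) = ((10 ^ Nat.log 10 N : Nat) : Int) := by
  induction fuel with
  | zero =>
    intro j hle hlt
    rw [Nat.add_zero] at hlt
    omega
  | succ fuel ih =>
    intro j hle hlt
    have hb : ((10 ^ j : Nat) : Int) * 10 = ((10 ^ (j + 1) : Nat) : Int) := by
      push_cast [pow_succ]; ring
    by_cases hc : 10 ^ (j + 1) ≤ N
    · rw [pow10Below, if_pos (by rw [hb]; exact_mod_cast hc), hb]
      exact ih (j + 1) hc (by rw [show j + 1 + fuel = j + (fuel + 1) from by omega]; exact hlt)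
    · rw [pow10Below, if_neg (by rw [hb]; intro hcon; exact hc (by exact_mod_cast hcon))]
      rw [Nat.log_eq_of_pow_le_of_lt_pow hle (by omega)]

theorem equal_nat : ∀ N : Nat, countDigitOne2 (N : Int) = countDigitOne2_alt (N : Int) := by
  intro N
  induction N using Nat.strong_induction_on with
  | _ N IH =>
    rcases Nat.eq_zero_or_pos N with h0 | h1
    · subst h0
      rw [countDigitOne2_alt]
      norm_num [countDigitOne2]
    · set L := Nat.log 10 N with hL
      have hLo : 10 ^ L ≤ N := Nat.pow_log_le_self 10 (by omega)
      have hHi : N < 10 ^ (L + 1) := Nat.lt_pow_succ_log_self (by norm_num) N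
      have hP1 : 1 ≤ 10 ^ L := Nat.one_le_pow _ _ (by norm_num)
      rw [countDigitOne2_alt, dif_neg (show ¬((N : Int) < 1) from by exact_mod_cast by omega)]
      have ht : ((N : Int)).toNat = N := by omega
      have hp : pow10Below ((N : Int)).toNat (N : Int) 1 = ((10 ^ L : Nat) : Int) := by
        rw [ht, show (1 : Int) = ((10 ^ 0 : Nat) : Int) from by norm_num]
        exact pow10Below_eq N N 0 (by simpa using h1)
          (by rw [Nat.zero_add]; exact Nat.lt_pow_self (by norm_num))
      have hsub : ((10 ^ L : Nat) : Int) - 1 = ((10 ^ L - 1 : Nat) : Int) := by omega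
      have hd1 : 10 ^ L - 1 < N := by omega
      have hd2 : N % 10 ^ L < N := by
        have := Nat.mod_lt N (show 0 < 10 ^ L by omega)
        omega
      simp only [hp, PySem.Int.floordiv_natCast, PySem.Int.mod_natCast, hsub]
      rw [← IH _ hd1, ← IH _ hd2]
      rw [A_eq_SA, A_eq_SA, A_eq_SA]
      have hmain := SA_main N L h1 hLo hHi
      by_cases hH : N / 10 ^ L = 1
      · rw [if_pos (show ((N / 10 ^ L : Nat) : Int) = 1 from by exact_mod_cast hH)]
        rw [hmain, if_pos hH]; push_cast; ring
      · rw [if_neg (show ¬(((N / 10 ^ L : Nat) : Int) = 1) from by exact_mod_cast hH)]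
        rw [hmain, if_neg hH]; push_cast; ring

theorem equal_all' (n : Int) : countDigitOne2 n = countDigitOne2_alt n := by
  rcases lt_or_ge n 1 with h | h
  · rw [countDigitOne2, if_pos h, countDigitOne2_alt, dif_pos h]
  · rw [show n = ((n.toNat : Nat) : Int) from by omega]
    exact equal_nat n.toNat

-- ===== VERDICT (by name: the statement is the Claim_ definition above) =====
theorem countDigitOne2_spec : Claim_equal_countDigitOne2 := by
  intro n _
  exact equal_all' n
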